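-- pv_equiv track=rewrite | github.com/morganism42/AdventOfCodeMaster | 2025/Dec6.py | part2
-- ===== SOURCE A (Python) =====
-- from math import prod
--
-- def parser(Data):
-- 	Data = Data.split('\n')
-- 	index = 0
-- 	problems = []
-- 	# split into problems by empty columns
-- 	for x in range(len(Data[0])):
-- 		if set([Data[y][x] for y in range(len(Data))]) == {' '}:
-- 			problems.append([Data[y][index:x] for y in range(len(Data))])
-- 			index = x + 1
-- 	else:
-- 		# needed as it there is no empty column at the end of the file
-- 		problems.append([Data[y][index:] for y in range(len(Data))])
-- 	return problems
--
-- def part2(Data):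
-- 	ans = 0
-- 	problems = parser(Data)
--
-- 	for problem in problems:
-- 		# make list with empty spaces for numbers
-- 		digits = len(problem[0])
-- 		numbers = [''] * digits
-- 		# since the first number will be the first digits etc. can take advantage of string adding
-- 		for num in problem[:-1]:
-- 			for n in range(digits):
-- 				numbers[n] += num[n]
-- 		numbers = [int(x) for x in numbers]
-- 		if '+' in problem[-1]:
-- 			ans += sum(numbers)
-- 		else:
-- 			ans += prod(numbers)
--
-- 	return ans
-- ===== SOURCE B (Python) =====
-- from math import prod
--
-- def _solve(group):
--     # one problem: each column is digits with a trailing operator-row char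
--     nums = [int(c[:-1]) for c in group]
--     return sum(nums) if any(c.endswith('+') for c in group) else prod(nums)
--
-- def part2(Data):
--     lines = Data.split('\n')
--     w = len(lines[0])
--     cols = [''.join(line[x] for line in lines) for x in range(w)]
--     total = 0
--     group = []
--     for c in cols:
--         if all(ch == ' ' for ch in c):
--             total += _solve(group)
--             group = []
--         else:
--             group.append(c)
--     return total + _solve(group)
-- ===== Notes on version B (the rewrite author's own statement) =====
-- stated objective: alternative
-- what changed: B transposes the grid once into column strings and folds over them, splitting at blank columns and evaluating each group directly from its columns (number = column minus its last char, operator = the last char), instead of A's parser that slices row segments per problem and rebuilds each number by a nested rows-by-digits string-accumulation loop over index ranges.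
-- outside the precondition, e.g. on part2('12\n34\n**+'): A returns 37, B returns 312; on part2(' 1\n11\n**'): A returns 11, B returns 11
import Mathlib
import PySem

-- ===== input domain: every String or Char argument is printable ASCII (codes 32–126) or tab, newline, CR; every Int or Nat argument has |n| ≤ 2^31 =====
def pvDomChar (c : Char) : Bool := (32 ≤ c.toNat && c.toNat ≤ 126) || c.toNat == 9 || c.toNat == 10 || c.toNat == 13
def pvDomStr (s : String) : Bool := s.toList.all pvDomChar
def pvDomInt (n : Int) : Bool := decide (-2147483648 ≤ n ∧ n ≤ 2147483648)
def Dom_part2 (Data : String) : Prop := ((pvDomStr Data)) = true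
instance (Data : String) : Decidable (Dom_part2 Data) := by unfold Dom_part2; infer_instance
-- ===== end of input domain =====

-- B re-groups the grid by columns (transpose once, split at blank columns) instead of A's
-- row-segment parser with a nested rows-by-digits accumulation; same cost, different decomposition.

-- ===== PORT A =====
-- literal transliteration of A (parser + part2); lists of characters stand for Python strings.
-- Data[y][x] is ported with pyGetD (default ' ') and int(x) with (ofChars? x).getD 0: Pre_part2
-- guarantees every such index is in range and every int() argument parses, so the defaults are never used.
def part2 (Data : String) : Int :=
  let lines := PySem.Chars.splitOn Data.toList ['\n']
  let L0 : Nat := (PySem.List.pyGetD lines 0 []).length      -- len(Data[0]); split never returns []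
  -- parser: for x in range(len(Data[0])): if set(col) == {' '}: append chunk
  let st := (PySem.List.pyRange 0 (L0 : Int) 1).foldl
    (fun (st : Int × List (List (List Char))) (x : Int) =>
      if PySem.Set.equal
           (PySem.Set.ofList (lines.map (fun row => PySem.List.pyGetD row x ' ')))
           (PySem.Set.ofList [' ']) then
        (x + 1, st.2 ++ [lines.map (fun row => PySem.List.slice row (some st.1) (some x))])
      else st)
    ((0 : Int), ([] : List (List (List Char))))
  let problems := st.2 ++ [lines.map (fun row => PySem.List.slice row (some st.1) none)]
  -- part2 main loop
  problems.foldl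
    (fun ans problem =>
      let digits : Nat := (PySem.List.pyGetD problem 0 []).length
      let numbers : List (List Char) :=
        (PySem.List.slice problem none (some (-1))).foldl
          (fun nums num =>
            (PySem.List.pyRange 0 (digits : Int) 1).foldl
              (fun ns n =>
                PySem.List.pySetD ns n (PySem.List.pyGetD ns n [] ++ [PySem.List.pyGetD num n ' ']))
              nums)
          (List.replicate digits ([] : List Char))
      let ints := numbers.map (fun s => (PySem.Int.ofChars? s).getD 0)
      if PySem.Chars.isIn ['+'] (PySem.List.pyGetD problem (-1) []) then ans + ints.sum
      else ans + ints.prod)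
    0

-- ===== PORT B =====
-- one problem = a group of columns: each column is a number with its operator-row char at the end
def pvSolve (group : List (List Char)) : Int :=
  let nums := group.map (fun c => (PySem.Int.ofChars? (PySem.List.slice c none (some (-1)))).getD 0)
  if group.any (fun c => PySem.Chars.endswith c ['+']) then nums.sum else nums.prod

def part2_alt (Data : String) : Int :=
  let lines := PySem.Chars.splitOn Data.toList ['\n']
  let w : Int := PySem.Chars.len (PySem.List.pyGetD lines 0 [])
  let cols := (PySem.List.pyRange 0 w 1).map (fun x => lines.map (fun l => PySem.List.pyGetD l x ' '))
  let st := cols.foldl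
    (fun (st : Int × List (List Char)) c =>
      if c.all (fun ch => ch == ' ') then (st.1 + pvSolve st.2, ([] : List (List Char)))
      else (st.1, st.2 ++ [c]))
    ((0 : Int), ([] : List (List Char)))
  st.1 + pvSolve st.2

-- ===== PRECONDITION & SPEC =====
-- Pre_ excludes grids with a line shorter than the first line (A raises IndexError there), grids
-- whose bottom line overhangs the first line's width with a plus sign in the overhang (A's
-- trailing operator test reads those characters while B's transposition does not), and grids
-- with a non-digit character in a number cell (where int() may raise ValueError, or apply
-- whitespace/sign tolerance on which both still agree).
def Pre_part2 (Data : String) : Prop :=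
  let lines := PySem.Chars.splitOn Data.toList ['\n']
  let L0 := (lines.getD 0 []).length
  (∀ l ∈ lines, L0 ≤ l.length) ∧
  (∀ x : Nat, x < L0 →
    (∀ l ∈ lines, l.getD x ' ' = ' ') ∨
    (2 ≤ lines.length ∧ ∀ l ∈ lines.dropLast, (l.getD x ' ').isDigit = true)) ∧
  ('+' ∉ (lines.getLast?.getD []).drop L0)
instance (Data : String) : Decidable (Pre_part2 Data) := by unfold Pre_part2; infer_instance

def pvWitness_part2 : String := "12 34\n56 78\n *  +"

def Spec_part2 (Data : String) (out : Int) : Prop := out = part2_alt Data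
instance (Data : String) (out : Int) : Decidable (Spec_part2 Data out) := by unfold Spec_part2; infer_instance

-- ===== CLAIM (what is proved, stated in full; the proofs are below) =====
def Claim_equal_part2 : Prop := ∀ (Data : String), Dom_part2 Data → Pre_part2 Data → Spec_part2 Data (part2 Data)

-- ===== LEMMAS AND PROOFS =====

-- the column of characters at index x (rows outside range contribute the unused default ' ')
def pvCol (rows : List (List Char)) (x : Nat) : List Char := rows.map (fun r => r.getD x ' ')

-- A's parser loop body, named
def pvStepA (lines : List (List Char)) (st : Int × List (List (List Char))) (x : Int) :
    Int × List (List (List Char)) :=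
  if PySem.Set.equal
       (PySem.Set.ofList (lines.map (fun row => PySem.List.pyGetD row x ' ')))
       (PySem.Set.ofList [' ']) then
    (x + 1, st.2 ++ [lines.map (fun row => PySem.List.slice row (some st.1) (some x))])
  else st

-- A's per-problem contribution, named
def pvContribA (problem : List (List Char)) : Int :=
  let digits : Nat := (PySem.List.pyGetD problem 0 []).length
  let numbers : List (List Char) :=
    (PySem.List.slice problem none (some (-1))).foldl
      (fun nums num =>
        (PySem.List.pyRange 0 (digits : Int) 1).foldl
          (fun ns n =>
            PySem.List.pySetD ns n (PySem.List.pyGetD ns n [] ++ [PySem.List.pyGetD num n ' ']))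
          nums)
      (List.replicate digits ([] : List Char))
  let ints := numbers.map (fun s => (PySem.Int.ofChars? s).getD 0)
  if PySem.Chars.isIn ['+'] (PySem.List.pyGetD problem (-1) []) then ints.sum else ints.prod

-- B's loop body, named
def pvStepB (st : Int × List (List Char)) (c : List Char) : Int × List (List Char) :=
  if c.all (fun ch => ch == ' ') then (st.1 + pvSolve st.2, ([] : List (List Char)))
  else (st.1, st.2 ++ [c])

-- the group of columns [i, a)
def pvGroup (rows : List (List Char)) (i a : Nat) : List (List Char) :=
  (List.range (a - i)).map (fun k => pvCol rows (i + k))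

-- A's final answer, resumed at column a with parser state (i, probs)
def pvArun (rows : List (List Char)) (W a i : Nat) (probs : List (List (List Char))) : Int :=
  let st := (PySem.List.pyRange (a : Int) (W : Int) 1).foldl (pvStepA rows) ((i : Int), probs)
  ((st.2 ++ [rows.map (fun r => PySem.List.slice r (some st.1) none)]).map pvContribA).sum

-- B's final answer, resumed at column a with state st
def pvBrun (rows : List (List Char)) (W a : Nat) (st : Int × List (List Char)) : Int :=
  let st' := ((List.range (W - a)).map (fun k => pvCol rows (a + k))).foldl pvStepB st
  st'.1 + pvSolve st'.2

lemma pvGo_ne_nil (sep : List Char) :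
    ∀ (fuel : Nat) (l cur : List Char) (acc : List (List Char)),
      PySem.Chars.splitOn.go sep fuel l cur acc ≠ [] := by
  intro fuel
  induction fuel with
  | zero => intro l cur acc; simp [PySem.Chars.splitOn.go]
  | succ n ih =>
    intro l cur acc
    cases l with
    | nil => simp [PySem.Chars.splitOn.go]
    | cons c rest =>
      rw [PySem.Chars.splitOn.go]
      split
      · exact ih _ _ _
      · exact ih _ _ _

lemma pvSplit_ne_nil (s sep : List Char) : PySem.Chars.splitOn s sep ≠ [] := by
  unfold PySem.Chars.splitOn
  exact pvGo_ne_nil sep _ s [] []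

-- ((range d).map g).set n v, as a map again
lemma pvSetMap {β : Type} (d n : Nat) (g : Nat → β) (v : β) :
    ((List.range d).map g).set n v = (List.range d).map (fun k => if k = n then v else g k) := by
  apply List.ext_getElem
  · simp
  · intro k h1 h2
    simp only [List.length_set, List.length_map, List.length_range] at h1
    rw [List.getElem_set]
    simp only [List.getElem_map, List.getElem_range]
    split
    · next h => subst h; simp
    · next h =>
      have hkn : k ≠ n := fun hh => h hh.symm
      simp [hkn]

lemma pvInnerGen (d : Nat) (num : List Char) :
    ∀ (m n0 : Nat) (g : Nat → List Char), d - n0 = m →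
      (PySem.List.pyRange (n0 : Int) (d : Int) 1).foldl
        (fun ns n =>
          PySem.List.pySetD ns n (PySem.List.pyGetD ns n [] ++ [PySem.List.pyGetD num n ' ']))
        ((List.range d).map g)
      = (List.range d).map (fun n => if n0 ≤ n then g n ++ [num.getD n ' '] else g n) := by
  intro m
  induction m with
  | zero =>
    intro n0 g hm
    have hdn : (d : Int) ≤ (n0 : Int) := by exact_mod_cast Nat.le_of_sub_eq_zero hm
    rw [PySem.List.pyRange_one_eq_nil hdn]
    simp only [List.foldl_nil]
    apply List.map_congr_left
    intro n hn
    simp only [List.mem_range] at hn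
    rw [if_neg (by omega)]
  | succ m ih =>
    intro n0 g hm
    have hlt : (n0 : Int) < (d : Int) := by exact_mod_cast (show n0 < d by omega)
    rw [PySem.List.pyRange_one_cons hlt, List.foldl_cons]
    rw [PySem.List.pyGetD_natCast num n0 ' ', PySem.List.pyGetD_natCast,
      PySem.List.getD_map_range g d n0 [] (by omega), PySem.List.pySetD_natCast, pvSetMap]
    have hcast : (n0 : Int) + 1 = ((n0 + 1 : Nat) : Int) := by push_cast; ring
    rw [hcast, ih (n0 + 1) _ (by omega)]
    apply List.map_congr_left
    intro n hn
    simp only [List.mem_range] at hn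
    by_cases h3 : n = n0
    · subst h3
      simp
    · by_cases h4 : n0 ≤ n
      · rw [if_pos (by omega), if_pos h4, if_neg h3]
      · rw [if_neg (by omega), if_neg h4, if_neg h3]

lemma pvInner (d : Nat) (num : List Char) (g : Nat → List Char) :
    (PySem.List.pyRange 0 (d : Int) 1).foldl
      (fun ns n =>
        PySem.List.pySetD ns n (PySem.List.pyGetD ns n [] ++ [PySem.List.pyGetD num n ' ']))
      ((List.range d).map g)
    = (List.range d).map (fun n => g n ++ [num.getD n ' ']) := by
  have h := pvInnerGen d num d 0 g (by omega)
  simp only [Nat.cast_zero] at h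
  rw [h]
  apply List.map_congr_left
  intro n hn
  rw [if_pos (Nat.zero_le n)]

lemma pvOuter (d : Nat) (rowsL : List (List Char)) :
    ∀ (g : Nat → List Char),
      rowsL.foldl
        (fun nums num =>
          (PySem.List.pyRange 0 (d : Int) 1).foldl
            (fun ns n =>
              PySem.List.pySetD ns n (PySem.List.pyGetD ns n [] ++ [PySem.List.pyGetD num n ' ']))
            nums)
        ((List.range d).map g)
      = (List.range d).map (fun n => g n ++ rowsL.map (fun r => r.getD n ' ')) := by
  induction rowsL with
  | nil => intro g; simp
  | cons num rest ih =>
    intro g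
    rw [List.foldl_cons, pvInner d num g, ih]
    apply List.map_congr_left
    intro n hn
    simp

lemma pvBlank (rows : List (List Char)) (hne : rows ≠ []) (x : Nat) :
    (PySem.Set.equal
       (PySem.Set.ofList (rows.map (fun row => PySem.List.pyGetD row (x : Int) ' ')))
       (PySem.Set.ofList [' ']) = true)
    ↔ ((pvCol rows x).all (fun ch => ch == ' ') = true) := by
  simp only [PySem.Set.equal_iff, PySem.Set.mem_ofList, List.all_eq_true, pvCol,
    PySem.List.pyGetD_natCast, beq_iff_eq, List.mem_singleton]
  constructor
  · intro h c hc
    exact (h c).mp hc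
  · intro h y
    constructor
    · exact h y
    · rintro rfl
      obtain ⟨r, hr⟩ := List.exists_mem_of_ne_nil rows hne
      have : r.getD x ' ' ∈ rows.map (fun r => r.getD x ' ') := List.mem_map_of_mem hr
      rwa [h _ this] at this

lemma pvSuffix_singleton {α : Type} (l : List α) (a : α) : [a] <:+ l ↔ l.getLast? = some a := by
  constructor
  · rintro ⟨s, rfl⟩; simp
  · rw [List.getLast?_eq_some_iff]; rintro ⟨ys, rfl⟩; exact ⟨ys, rfl⟩

lemma pvChunk (rows : List (List Char)) (W : Nat) (hne : rows ≠ [])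
    (hW : ∀ r ∈ rows, W ≤ r.length) (i j : Nat) (hij : i ≤ j) (hjW : j ≤ W) :
    pvContribA (rows.map (fun r => List.take (j - i) (List.drop i r))) = pvSolve (pvGroup rows i j) := by
  have hne' : rows.map (fun r => List.take (j - i) (List.drop i r)) ≠ [] := by
    simpa using hne
  -- the last row and its length
  have hlastmem : rows.getLast hne ∈ rows := List.getLast_mem hne
  have hlastW : W ≤ (rows.getLast hne).length := hW _ hlastmem
  -- the first chunk has length j - i
  obtain ⟨r0, rest, hrows⟩ : ∃ r0 rest, rows = r0 :: rest := by
    cases rows with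
    | nil => exact absurd rfl hne
    | cons r0 rest => exact ⟨r0, rest, rfl⟩
  have hr0W : W ≤ r0.length := hW r0 (by rw [hrows]; exact List.mem_cons_self)
  simp only [pvContribA, pvSolve, pvGroup]
  have hdig : (PySem.List.pyGetD (rows.map (fun r => List.take (j - i) (List.drop i r))) 0 []).length
      = j - i := by
    rw [hrows]
    simp only [List.map_cons, PySem.List.pyGetD_zero_cons]
    simp only [List.length_take, List.length_drop]
    omega
  rw [hdig]
  -- numbers: the nested loops, computed by pvOuter
  rw [PySem.List.slice_to_neg_one, ← List.map_dropLast,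
    show List.replicate (j - i) ([] : List Char)
        = (List.range (j - i)).map (fun _ => ([] : List Char)) by
      rw [List.map_const', List.length_range],
    pvOuter]
  -- the resulting int list equals B's
  have hints :
      ((List.range (j - i)).map
          (fun n => ([] : List Char) ++
            (rows.dropLast.map (fun r => List.take (j - i) (List.drop i r))).map
              (fun r => r.getD n ' '))).map (fun s => (PySem.Int.ofChars? s).getD 0)
      = ((List.range (j - i)).map (fun k => pvCol rows (i + k))).map
          (fun c => (PySem.Int.ofChars? (PySem.List.slice c none (some (-1)))).getD 0) := by
    rw [List.map_map, List.map_map]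
    apply List.map_congr_left
    intro n hn
    simp only [List.mem_range] at hn
    simp only [Function.comp_apply, List.nil_append, PySem.List.slice_to_neg_one, pvCol,
      ← List.map_dropLast, List.map_map]
    congr 2
    apply List.map_congr_left
    intro r _
    simp only [Function.comp_apply]
    rw [List.getD_eq_getElem?_getD, List.getD_eq_getElem?_getD,
      List.getElem?_take_of_lt hn, List.getElem?_drop]
  -- the operator conditions agree
  have hlast' : PySem.List.pyGetD (rows.map (fun r => List.take (j - i) (List.drop i r))) (-1) []
      = List.take (j - i) (List.drop i (rows.getLast hne)) := by
    rw [PySem.List.pyGetD_neg_one _ _ hne']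
    have h1 := List.getLast?_eq_some_getLast hne'
    rw [List.getLast?_map, List.getLast?_eq_some_getLast hne] at h1
    exact (Option.some.inj h1).symm
  have hcond :
      PySem.Chars.isIn ['+']
        (PySem.List.pyGetD (rows.map (fun r => List.take (j - i) (List.drop i r))) (-1) [])
      = ((List.range (j - i)).map (fun k => pvCol rows (i + k))).any
          (fun c => PySem.Chars.endswith c ['+']) := by
    rw [hlast']
    apply Bool.coe_iff_coe.mp
    rw [PySem.Chars.isIn_iff_infix, List.singleton_infix_iff, List.any_eq_true]
    constructor
    · intro hmem
      obtain ⟨k, hk, hkc⟩ := List.mem_iff_getElem.mp hmem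
      have hkd : k < j - i := by
        have h2 := hk
        simp [List.length_take, List.length_drop] at h2
        exact h2.1
      refine ⟨pvCol rows (i + k), List.mem_map_of_mem (List.mem_range.mpr hkd), ?_⟩
      rw [PySem.Chars.endswith_iff, pvSuffix_singleton, pvCol, ← hkc,
        List.getElem_take, List.getElem_drop, List.getLast?_map,
        List.getLast?_eq_some_getLast hne]
      simp only [Option.map_some]
      congr 1
      rw [List.getD_eq_getElem _ _ (show i + k < (rows.getLast hne).length by omega)]
    · rintro ⟨c, hc, hcend⟩
      obtain ⟨k, hk, rfl⟩ := List.mem_map.mp hc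
      have hkd : k < j - i := List.mem_range.mp hk
      rw [PySem.Chars.endswith_iff, pvSuffix_singleton, pvCol, List.getLast?_map,
        List.getLast?_eq_some_getLast hne] at hcend
      simp only [Option.map_some, Option.some.injEq] at hcend
      rw [List.getD_eq_getElem _ _ (show i + k < (rows.getLast hne).length by omega)] at hcend
      apply List.mem_iff_getElem.mpr
      refine ⟨k, by simp [List.length_take, List.length_drop]; omega, ?_⟩
      rw [List.getElem_take, List.getElem_drop, hcend]
  rw [hints, hcond]

lemma pvChunkTrail (rows : List (List Char)) (W : Nat) (hne : rows ≠ [])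
    (hhead : (rows.getD 0 []).length = W)
    (hge : ∀ r ∈ rows, W ≤ r.length)
    (hplus : ∀ c ∈ (rows.getLast hne).drop W, c ≠ '+')
    (i : Nat) (hiW : i ≤ W) :
    pvContribA (rows.map (fun r => List.drop i r)) = pvSolve (pvGroup rows i W) := by
  have hne' : rows.map (fun r => List.drop i r) ≠ [] := by simpa using hne
  have hlastmem : rows.getLast hne ∈ rows := List.getLast_mem hne
  have hlastW : W ≤ (rows.getLast hne).length := hge _ hlastmem
  obtain ⟨r0, rest, hrows⟩ : ∃ r0 rest, rows = r0 :: rest := by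
    cases rows with
    | nil => exact absurd rfl hne
    | cons r0 rest => exact ⟨r0, rest, rfl⟩
  have hr0W : r0.length = W := by rw [hrows] at hhead; simpa using hhead
  simp only [pvContribA, pvSolve, pvGroup]
  have hdig : (PySem.List.pyGetD (rows.map (fun r => List.drop i r)) 0 []).length = W - i := by
    rw [hrows]
    simp only [List.map_cons, PySem.List.pyGetD_zero_cons, List.length_drop]
    omega
  rw [hdig]
  rw [PySem.List.slice_to_neg_one, ← List.map_dropLast,
    show List.replicate (W - i) ([] : List Char)
        = (List.range (W - i)).map (fun _ => ([] : List Char)) by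
      rw [List.map_const', List.length_range],
    pvOuter]
  have hints :
      ((List.range (W - i)).map
          (fun n => ([] : List Char) ++
            (rows.dropLast.map (fun r => List.drop i r)).map
              (fun r => r.getD n ' '))).map (fun s => (PySem.Int.ofChars? s).getD 0)
      = ((List.range (W - i)).map (fun k => pvCol rows (i + k))).map
          (fun c => (PySem.Int.ofChars? (PySem.List.slice c none (some (-1)))).getD 0) := by
    rw [List.map_map, List.map_map]
    apply List.map_congr_left
    intro n hn
    simp only [List.mem_range] at hn
    simp only [Function.comp_apply, List.nil_append, PySem.List.slice_to_neg_one, pvCol,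
      ← List.map_dropLast, List.map_map]
    congr 2
    apply List.map_congr_left
    intro r _
    simp only [Function.comp_apply]
    rw [List.getD_eq_getElem?_getD, List.getD_eq_getElem?_getD, List.getElem?_drop]
  have hlast' : PySem.List.pyGetD (rows.map (fun r => List.drop i r)) (-1) []
      = List.drop i (rows.getLast hne) := by
    rw [PySem.List.pyGetD_neg_one _ _ hne']
    have h1 := List.getLast?_eq_some_getLast hne'
    rw [List.getLast?_map, List.getLast?_eq_some_getLast hne] at h1
    exact (Option.some.inj h1).symm
  have hcond :
      PySem.Chars.isIn ['+']
        (PySem.List.pyGetD (rows.map (fun r => List.drop i r)) (-1) [])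
      = ((List.range (W - i)).map (fun k => pvCol rows (i + k))).any
          (fun c => PySem.Chars.endswith c ['+']) := by
    rw [hlast']
    apply Bool.coe_iff_coe.mp
    rw [PySem.Chars.isIn_iff_infix, List.singleton_infix_iff, List.any_eq_true]
    constructor
    · intro hmem
      obtain ⟨k, hk, hkc⟩ := List.mem_iff_getElem.mp hmem
      have hklen : i + k < (rows.getLast hne).length := by
        simp only [List.length_drop] at hk
        omega
      rw [List.getElem_drop] at hkc
      have hkd : k < W - i := by
        by_contra hnot
        -- the character would lie in the forbidden overhang
        have hmem2 : '+' ∈ (rows.getLast hne).drop W := by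
          apply List.mem_iff_getElem.mpr
          refine ⟨i + k - W, by simp only [List.length_drop]; omega, ?_⟩
          rw [List.getElem_drop, ← hkc]
          congr 1
          omega
        exact absurd rfl (hplus '+' hmem2)
      refine ⟨pvCol rows (i + k), List.mem_map_of_mem (List.mem_range.mpr hkd), ?_⟩
      rw [PySem.Chars.endswith_iff, pvSuffix_singleton, pvCol, ← hkc, List.getLast?_map,
        List.getLast?_eq_some_getLast hne]
      simp only [Option.map_some]
      congr 1
      rw [List.getD_eq_getElem _ _ hklen]
    · rintro ⟨c, hc, hcend⟩
      obtain ⟨k, hk, rfl⟩ := List.mem_map.mp hc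
      have hkd : k < W - i := List.mem_range.mp hk
      rw [PySem.Chars.endswith_iff, pvSuffix_singleton, pvCol, List.getLast?_map,
        List.getLast?_eq_some_getLast hne] at hcend
      simp only [Option.map_some, Option.some.injEq] at hcend
      rw [List.getD_eq_getElem _ _ (show i + k < (rows.getLast hne).length by omega)] at hcend
      apply List.mem_iff_getElem.mpr
      refine ⟨k, by simp only [List.length_drop]; omega, ?_⟩
      rw [List.getElem_drop, hcend]
  rw [hints, hcond]

lemma pvBlin (cs : List (List Char)) :
    ∀ (t : Int) (g : List (List Char)),
      cs.foldl pvStepB (t, g)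
      = (t + (cs.foldl pvStepB (0, g)).1, (cs.foldl pvStepB (0, g)).2) := by
  induction cs with
  | nil => intro t g; simp
  | cons c cs ih =>
    intro t g
    rw [List.foldl_cons, List.foldl_cons]
    by_cases hb : (c.all (fun ch => ch == ' ')) = true
    · simp only [pvStepB, if_pos hb]
      rw [ih (t + pvSolve g) [], ih (0 + pvSolve g) []]
      simp [add_assoc]
    · simp only [pvStepB, if_neg hb]
      exact ih t (g ++ [c])

lemma pvBrun_add (rows : List (List Char)) (W a : Nat) (t : Int) (g : List (List Char)) :
    pvBrun rows W a (t, g) = t + pvBrun rows W a (0, g) := by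
  unfold pvBrun
  rw [pvBlin]
  simp [add_assoc]

lemma pvBrun_step (rows : List (List Char)) (W a : Nat) (h : a < W) (st : Int × List (List Char)) :
    pvBrun rows W a st = pvBrun rows W (a + 1) (pvStepB st (pvCol rows a)) := by
  unfold pvBrun
  rw [show W - a = (W - (a + 1)) + 1 by omega, List.range_succ_eq_map]
  have hmap : (List.range (W - (a + 1))).map ((fun k => pvCol rows (a + k)) ∘ Nat.succ)
      = (List.range (W - (a + 1))).map (fun k => pvCol rows (a + 1 + k)) := by
    apply List.map_congr_left
    intro k _
    simp only [Function.comp_apply]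
    congr 1
    omega
  simp only [List.map_cons, List.map_map, List.foldl_cons, Nat.add_zero, hmap]

lemma pvMain (rows : List (List Char)) (W : Nat) (hne : rows ≠ [])
    (hhead : (rows.getD 0 []).length = W)
    (hge : ∀ r ∈ rows, W ≤ r.length)
    (hplus : ∀ c ∈ (rows.getLast hne).drop W, c ≠ '+') :
    ∀ (n a i : Nat) (probs : List (List (List Char))), W - a = n → i ≤ a → a ≤ W →
      pvArun rows W a i probs
      = (probs.map pvContribA).sum + pvBrun rows W a (0, pvGroup rows i a) := by
  intro n
  induction n with
  | zero =>
    intro a i probs hn hia haW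
    have haW' : a = W := by omega
    subst a
    unfold pvArun pvBrun
    rw [PySem.List.pyRange_one_eq_nil (le_refl _)]
    simp only [List.foldl_nil, Nat.sub_self, List.range_zero, List.map_nil, List.foldl_nil]
    rw [List.map_append, List.sum_append]
    simp only [List.map_cons, List.map_nil, List.sum_cons, List.sum_nil, add_zero]
    have htrail : rows.map (fun r => PySem.List.slice r (some (i : Int)) none)
        = rows.map (fun r => List.drop i r) := by
      apply List.map_congr_left
      intro r hr
      rw [PySem.List.slice_from_natCast]
    rw [htrail, pvChunkTrail rows W hne hhead hge hplus i hia]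
    ring
  | succ n ih =>
    intro a i probs hn hia haW
    have haltW : a < W := by omega
    have hlt : ((a : Nat) : Int) < ((W : Nat) : Int) := by exact_mod_cast haltW
    have hcast : ((a : Nat) : Int) + 1 = (((a + 1 : Nat)) : Int) := by push_cast; ring
    unfold pvArun
    rw [PySem.List.pyRange_one_cons hlt, List.foldl_cons, hcast]
    by_cases hb : ((pvCol rows a).all (fun ch => ch == ' ')) = true
    · -- blank column: A cuts a chunk, B flushes the group
      have hbA := (pvBlank rows hne a).mpr hb
      rw [show pvStepA rows (((i : Nat) : Int), probs) ((a : Nat) : Int)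
            = ((((a + 1 : Nat)) : Int),
               probs ++ [rows.map (fun row => PySem.List.slice row (some (i : Int)) (some (a : Int)))])
          from by simp only [pvStepA, if_pos hbA, hcast]]
      have h1 := ih (a + 1) (a + 1) (probs ++ [rows.map (fun row => PySem.List.slice row (some (i : Int)) (some (a : Int)))]) (by omega) (le_refl _) (by omega)
      unfold pvArun at h1
      rw [h1]
      rw [pvBrun_step rows W a haltW]
      have hstep : pvStepB (0, pvGroup rows i a) (pvCol rows a)
          = (0 + pvSolve (pvGroup rows i a), []) := by simp [pvStepB, hb]
      rw [hstep, pvBrun_add rows W (a + 1) (0 + pvSolve (pvGroup rows i a)) []]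
      have hchunk : rows.map (fun row => PySem.List.slice row (some (i : Int)) (some (a : Int)))
          = rows.map (fun r => List.take (a - i) (List.drop i r)) := by
        apply List.map_congr_left
        intro r _
        rw [PySem.List.slice_natCast]
      rw [List.map_append, List.sum_append]
      simp only [List.map_cons, List.map_nil, List.sum_cons, List.sum_nil, add_zero]
      rw [hchunk, pvChunk rows W hne hge i a hia (by omega)]
      have hgnil : pvGroup rows (a + 1) (a + 1) = [] := by simp [pvGroup]
      rw [hgnil]
      ring
    · -- non-blank column: both extend the current group
      have hbA : ¬ (PySem.Set.equal
          (PySem.Set.ofList (rows.map (fun row => PySem.List.pyGetD row ((a : Nat) : Int) ' ')))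
          (PySem.Set.ofList [' ']) = true) := fun h => hb ((pvBlank rows hne a).mp h)
      rw [show pvStepA rows (((i : Nat) : Int), probs) ((a : Nat) : Int) = (((i : Nat) : Int), probs)
          from by simp only [pvStepA, if_neg hbA]]
      have h1 := ih (a + 1) i probs (by omega) (by omega) (by omega)
      unfold pvArun at h1
      rw [h1]
      rw [pvBrun_step rows W a haltW]
      have hg : pvGroup rows i a ++ [pvCol rows a] = pvGroup rows i (a + 1) := by
        unfold pvGroup
        rw [show a + 1 - i = (a - i) + 1 by omega, List.range_succ, List.map_append]
        simp [show i + (a - i) = a by omega]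
      rw [show pvStepB (0, pvGroup rows i a) (pvCol rows a) = (0, pvGroup rows i (a + 1))
          from by simp [pvStepB, hb, hg]]

lemma pvA_bridge (Data : String) :
    part2 Data
    = pvArun (PySem.Chars.splitOn Data.toList ['\n'])
        (((PySem.Chars.splitOn Data.toList ['\n']).getD 0 []).length) 0 0 [] := by
  simp only [part2, pvArun]
  rw [PySem.List.pyGetD_zero]
  have hfun : ∀ (ans : Int) (problem : List (List Char)),
      (let digits : Nat := (PySem.List.pyGetD problem 0 []).length
       let numbers : List (List Char) :=
         (PySem.List.slice problem none (some (-1))).foldl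
           (fun nums num =>
             (PySem.List.pyRange 0 (digits : Int) 1).foldl
               (fun ns n =>
                 PySem.List.pySetD ns n (PySem.List.pyGetD ns n [] ++ [PySem.List.pyGetD num n ' ']))
               nums)
           (List.replicate digits ([] : List Char))
       let ints := numbers.map (fun s => (PySem.Int.ofChars? s).getD 0)
       if PySem.Chars.isIn ['+'] (PySem.List.pyGetD problem (-1) []) then ans + ints.sum
       else ans + ints.prod)
      = ans + pvContribA problem := by
    intro ans problem
    by_cases h : PySem.Chars.isIn ['+'] (PySem.List.pyGetD problem (-1) []) = true <;>
      simp [pvContribA, h]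
  simp only [hfun]
  rw [PySem.List.foldl_add, zero_add]
  simp only [Nat.cast_zero]
  rfl

lemma pvB_bridge (Data : String) (W : Nat)
    (hhead : ((PySem.Chars.splitOn Data.toList ['\n']).getD 0 []).length = W) :
    part2_alt Data = pvBrun (PySem.Chars.splitOn Data.toList ['\n']) W 0 (0, []) := by
  simp only [part2_alt]
  have hw : PySem.Chars.len (PySem.List.pyGetD (PySem.Chars.splitOn Data.toList ['\n']) 0 [])
      = (W : Int) := by
    rw [PySem.List.pyGetD_zero, PySem.Chars.len_eq, hhead]
  rw [hw, PySem.List.pyRange_one, List.map_map,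
    show (((W : Nat) : Int) - 0).toNat = W by omega]
  have hcols :
      List.map
        ((fun x => List.map (fun l => PySem.List.pyGetD l x ' ')
            (PySem.Chars.splitOn Data.toList ['\n'])) ∘ (fun k : Nat => (0 : Int) + (k : Int)))
        (List.range W)
      = List.map (fun k => pvCol (PySem.Chars.splitOn Data.toList ['\n']) (0 + k))
          (List.range W) := by
    apply List.map_congr_left
    intro k _
    simp only [Function.comp_apply, zero_add, PySem.List.pyGetD_natCast]
    rfl
  exact congrArg
    (fun cs => (List.foldl pvStepB ((0 : Int), ([] : List (List Char))) cs).1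
      + pvSolve (List.foldl pvStepB ((0 : Int), ([] : List (List Char))) cs).2)
    hcols

-- ===== VERDICT (by name: the statement is the Claim_ definition above) =====
theorem part2_spec : Claim_equal_part2 := by
  intro Data _hDom hPre
  unfold Spec_part2
  simp only [Pre_part2] at hPre
  obtain ⟨hge, _, hplus0⟩ := hPre
  have hne := pvSplit_ne_nil Data.toList ['\n']
  have hlast : (PySem.Chars.splitOn Data.toList ['\n']).getLast?.getD []
      = (PySem.Chars.splitOn Data.toList ['\n']).getLast hne := by
    rw [List.getLast?_eq_some_getLast hne]
    rfl
  rw [hlast] at hplus0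
  have hplus : ∀ c ∈ ((PySem.Chars.splitOn Data.toList ['\n']).getLast hne).drop
      (((PySem.Chars.splitOn Data.toList ['\n']).getD 0 []).length), c ≠ '+' :=
    fun c hc he => hplus0 (he ▸ hc)
  rw [pvA_bridge Data, pvB_bridge Data _ rfl,
    pvMain _ _ hne rfl hge hplus
      (((PySem.Chars.splitOn Data.toList ['\n']).getD 0 []).length) 0 0 []
      rfl (le_refl 0) (Nat.zero_le _)]
  simp [pvGroup]
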